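-- pv_equiv track=rewrite | github.com/rcarlsson/adventofcode | 2017/09/aoc_09b.py | solve
-- ===== SOURCE A (Python) =====
-- def solve(data_stream):
--     garbage = False
--     negate = False
--     result = 0
--     for idx in range(len(data_stream)):
--         char = data_stream[idx]
--
--         if negate:
--             negate = False
--             continue
--         elif char == "!":
--             negate = True
--             continue
--         elif not garbage and char == "<":
--             garbage = True
--             continue
--         elif char == ">":
--             garbage = False
--             continue
--
--         if garbage:
--             result += 1
--
--     return result
-- ===== SOURCE B (Python) =====
-- def solve(data_stream):
--     # pass 1: strip every '!' together with the character it escapes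
--     cleaned = []
--     i = 0
--     while i < len(data_stream):
--         if data_stream[i] == "!":
--             i += 2
--         else:
--             cleaned.append(data_stream[i])
--             i += 1
--     # pass 2: count non-marker characters inside garbage
--     garbage = False
--     result = 0
--     for char in cleaned:
--         if not garbage and char == "<":
--             garbage = True
--         elif char == ">":
--             garbage = False
--         elif garbage:
--             result += 1
--     return result
-- ===== Notes on version B (the rewrite author's own statement) =====
-- stated objective: alternative
-- what changed: Splits A's single three-state (garbage,negate) machine into two passes: one pass strips '!'-escapes producing a cleaned list, a second pass counts garbage characters with a single boolean; the negate state disappears.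
import Mathlib
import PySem

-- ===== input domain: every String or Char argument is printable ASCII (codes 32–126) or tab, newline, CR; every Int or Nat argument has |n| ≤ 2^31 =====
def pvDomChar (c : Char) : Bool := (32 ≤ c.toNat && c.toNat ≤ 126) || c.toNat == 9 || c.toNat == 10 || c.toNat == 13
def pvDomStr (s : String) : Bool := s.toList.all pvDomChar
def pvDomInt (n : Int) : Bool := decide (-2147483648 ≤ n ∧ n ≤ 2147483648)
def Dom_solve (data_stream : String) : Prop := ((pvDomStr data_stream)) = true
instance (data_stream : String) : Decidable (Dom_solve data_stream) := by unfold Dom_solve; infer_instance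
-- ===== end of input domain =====

-- B replaces A's single three-state scan by two passes (strip '!'-escapes, then count garbage); alternative decomposition, same cost.


-- ===== PORT A =====
-- state = (garbage, negate, result), exactly A's loop body branch by branch
def solveStep (st : Bool × Bool × Int) (c : Char) : Bool × Bool × Int :=
  match st with
  | (garbage, negate, result) =>
    if negate then (garbage, false, result)
    else if c = '!' then (garbage, true, result)
    else if ¬garbage ∧ c = '<' then (true, false, result)
    else if c = '>' then (false, false, result)
    else (garbage, negate, if garbage then result + 1 else result)

def solve (data_stream : String) : Int :=
  (data_stream.toList.foldl solveStep (false, false, 0)).2.2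

-- ===== PORT B =====
-- pass 1 of Source B: drop each '!' together with the character it escapes
def cleanEsc : List Char → List Char
  | [] => []
  | '!' :: [] => []
  | '!' :: _ :: rest => cleanEsc rest
  | c :: rest => c :: cleanEsc rest

-- pass 2 of Source B: state = (garbage, result)
def pass2Step (st : Bool × Int) (c : Char) : Bool × Int :=
  match st with
  | (garbage, result) =>
    if ¬garbage ∧ c = '<' then (true, result)
    else if c = '>' then (false, result)
    else if garbage then (garbage, result + 1)
    else (garbage, result)

def solve_alt (data_stream : String) : Int :=
  ((cleanEsc data_stream.toList).foldl pass2Step (false, 0)).2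

-- ===== PRECONDITION & SPEC =====
def Spec_solve (data_stream : String) (out : Int) : Prop := out = solve_alt data_stream
instance (data_stream : String) (out : Int) : Decidable (Spec_solve data_stream out) := by unfold Spec_solve; infer_instance

-- ===== CLAIM (what is proved, stated in full; the proofs are below) =====
def Claim_equal_solve : Prop := ∀ (data_stream : String), Dom_solve data_stream → Spec_solve data_stream (solve data_stream)

-- ===== LEMMAS AND PROOFS =====
-- From a negate-off state, A's fold computes exactly B's second pass on the cleaned list.
theorem fold_eq (l : List Char) : ∀ (g : Bool) (r : Int),
    (l.foldl solveStep (g, false, r)).2.2 = ((cleanEsc l).foldl pass2Step (g, r)).2 := by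
  induction l using cleanEsc.induct with
  | case1 => intro g r; simp [cleanEsc]
  | case2 => intro g r; simp [cleanEsc, solveStep]
  | case3 c rest ih =>
      intro g r
      simp only [cleanEsc, List.foldl]
      have h1 : solveStep (g, false, r) '!' = (g, true, r) := by simp [solveStep]
      have h2 : solveStep (g, true, r) c = (g, false, r) := by simp [solveStep]
      rw [h1, h2, ih]
  | case4 c rest h1 h2 ih =>
      intro g r
      have hc : ¬ c = '!' := by
        intro h
        cases rest with
        | nil => exact h1 h rfl
        | cons a t => exact h2 a t h rfl
      simp only [cleanEsc, List.foldl, solveStep, pass2Step, hc, if_false]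
      by_cases hlt : ¬ g = true ∧ c = '<'
      · simp only [if_pos hlt]; exact ih true r
      · simp only [if_neg hlt]
        by_cases hgt : c = '>'
        · simp only [if_pos hgt]; exact ih false r
        · simp only [if_neg hgt]
          cases g with
          | false => simpa using ih false r
          | true => simpa using ih true (r + 1)

-- ===== VERDICT (by name: the statement is the Claim_ definition above) =====
theorem solve_spec : Claim_equal_solve := by
  intro s _
  unfold Spec_solve solve solve_alt
  exact fold_eq s.toList false 0
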